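-- pv_equiv track=rewrite | github.com/aviswerdlow/k4 | 07_TOOLS/fork_g/g1_enhanced_keys.py | _word_to_key
-- ===== SOURCE A (Python) =====
-- from typing import List, Dict, Tuple
--
-- def _word_to_key(word: str, length: int) -> List[int]:
--     """Convert word to columnar key of given length"""
--     # Remove duplicates, preserve order
--     seen = set()
--     unique = []
--     for char in word.upper():
--         if char not in seen and char.isalpha():
--             seen.add(char)
--             unique.append(char)
--
--     # Fill to length with remaining alphabet
--     for char in "ABCDEFGHIJKLMNOPQRSTUVWXYZ":
--         if len(unique) >= length:
--             break
--         if char not in seen: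
--             unique.append(char)
--             seen.add(char)
--
--     # Truncate to length
--     unique = unique[:length]
--
--     # Convert to column order
--     sorted_chars = sorted(enumerate(unique), key=lambda x: x[1])
--     key = [0] * length
--     for rank, (pos, _) in enumerate(sorted_chars, 1):
--         key[pos] = rank
--
--     return key
-- ===== SOURCE B (Python) =====
-- ALPHABET = "ABCDEFGHIJKLMNOPQRSTUVWXYZ"
--
-- def _word_to_key(word, length):
--     """Convert word to columnar key of given length"""
--     # ordered dedup of the alphabetic characters
--     unique = list(dict.fromkeys(c for c in word.upper() if c.isalpha()))
--     # pad with the unused alphabet letters, then truncate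
--     missing = [c for c in ALPHABET if c not in unique]
--     unique = (unique + missing[:max(length - len(unique), 0)])[:length]
--     # rank by counting strictly-smaller characters (all distinct, so no ties)
--     key = [1 + sum(d < c for d in unique) for c in unique]
--     return key + [0] * (length - len(key))
-- ===== Notes on version B (the rewrite author's own statement) =====
-- stated objective: simpler
-- what changed: B replaces the fold-with-seen-set dedup by an ordered dedup of the filtered letters, replaces the break-loop padding by 'unused alphabet letters, take what is needed', and above all replaces the sort/enumerate/scatter rank assignment by a direct count-smaller rank per position (all characters are distinct, so counting strictly smaller characters reproduces the sort-based ranks).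
import Mathlib
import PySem

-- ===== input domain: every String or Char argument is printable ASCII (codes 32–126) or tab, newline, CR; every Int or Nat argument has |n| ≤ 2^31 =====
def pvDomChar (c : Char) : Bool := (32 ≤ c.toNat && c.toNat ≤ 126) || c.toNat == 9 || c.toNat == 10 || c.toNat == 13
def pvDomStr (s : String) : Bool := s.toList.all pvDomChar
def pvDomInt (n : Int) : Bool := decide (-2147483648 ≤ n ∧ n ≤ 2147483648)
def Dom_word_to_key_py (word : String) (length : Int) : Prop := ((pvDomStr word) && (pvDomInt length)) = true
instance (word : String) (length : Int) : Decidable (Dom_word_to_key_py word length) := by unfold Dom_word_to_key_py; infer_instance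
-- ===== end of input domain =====

-- B builds the same columnar key with an ordered dedup + take-what-is-needed padding and
-- count-smaller ranks instead of A's seen-set loops and sort/enumerate/scatter (objective: simpler).


-- ===== PORT A =====
def pvAlpha : List Char := "ABCDEFGHIJKLMNOPQRSTUVWXYZ".toList

-- for char in word.upper(): if char not in seen and char.isalpha(): seen.add(char); unique.append(char)
def pvDedupA (cs : List Char) : PySem.Set Char × List Char :=
  cs.foldl (fun su c =>
    if ¬ (PySem.Set.contains su.1 c) = true ∧ PySem.Chars.isalpha c = true then
      (PySem.Set.add su.1 c, su.2 ++ [c])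
    else su) (PySem.Set.empty, [])

-- for char in ALPHABET: if len(unique) >= length: break; if char not in seen: unique.append(char); seen.add(char)
def pvPadA : List Char → PySem.Set Char → List Char → Int → List Char
  | [], _, u, _ => u
  | c :: cs, s, u, len =>
    if len ≤ (u.length : Int) then u
    else if ¬ (PySem.Set.contains s c) = true then pvPadA cs (PySem.Set.add s c) (u ++ [c]) len
    else pvPadA cs s u len

def word_to_key_py (word : String) (length : Int) : List Int :=
  let su := pvDedupA (PySem.Str.upper word).toList
  let unique := pvPadA pvAlpha su.1 su.2 length
  let unique := PySem.List.slice unique none (some length)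
  let sortedChars := PySem.List.sorted (PySem.List.enumerate unique 0) (fun x => x.2) false
  -- key = [0]*length; for rank, (pos, _) in enumerate(sorted_chars, 1): key[pos] = rank
  -- every pos is in range on Pre_, where pySetD is exactly Python's key[pos] = rank
  (PySem.List.enumerate sortedChars 1).foldl
    (fun key rp => PySem.List.pySetD key rp.2.1 rp.1)
    (PySem.List.pyRepeat [(0 : Int)] length)

-- ===== PORT B =====
def word_to_key_py_alt (word : String) (length : Int) : List Int :=
  let unique := PySem.List.dedup (((PySem.Str.upper word).toList).filter PySem.Chars.isalpha)
  let missing := pvAlpha.filter (fun c => !(unique.contains c))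
  let unique2 := PySem.List.slice (unique ++ missing.take (length - (unique.length : Int)).toNat) none (some length)
  let key := unique2.map (fun c => 1 + ((unique2.filter (fun d => decide (d < c))).length : Int))
  key ++ List.replicate (length - (key.length : Int)).toNat 0

-- ===== PRECONDITION & SPEC =====
-- Pre_ excludes the negative lengths on which the word has more distinct letters than -length:
-- there A's assignment key[pos] = rank hits the empty key list and raises IndexError.
def Pre_word_to_key_py (word : String) (length : Int) : Prop :=
  0 ≤ length ∨
    ((PySem.List.dedup (((PySem.Str.upper word).toList).filter PySem.Chars.isalpha)).length : Int) ≤ -length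
instance (word : String) (length : Int) : Decidable (Pre_word_to_key_py word length) := by
  unfold Pre_word_to_key_py; infer_instance
def pvWitness_word_to_key_py : String × Int := ("HELLO", 5)

def Spec_word_to_key_py (word : String) (length : Int) (out : List Int) : Prop := out = word_to_key_py_alt word length
instance (word : String) (length : Int) (out : List Int) : Decidable (Spec_word_to_key_py word length out) := by unfold Spec_word_to_key_py; infer_instance

-- ===== CLAIM (what is proved, stated in full; the proofs are below) =====
def Claim_equal_word_to_key_py : Prop := ∀ (word : String) (length : Int), Dom_word_to_key_py word length → Pre_word_to_key_py word length → Spec_word_to_key_py word length (word_to_key_py word length)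



-- ===== LEMMAS AND PROOFS =====

-- Phase 1 of A: the seen-set/unique fold keeps seen = unique and computes an ordered dedup.
lemma pvDedupA_foldl (cs : List Char) (u : List Char) :
    cs.foldl (fun su c =>
      if ¬ (PySem.Set.contains su.1 c) = true ∧ PySem.Chars.isalpha c = true then
        (PySem.Set.add su.1 c, su.2 ++ [c])
      else su) (u, u)
    = ((cs.filter PySem.Chars.isalpha).foldl PySem.Set.add u,
       (cs.filter PySem.Chars.isalpha).foldl PySem.Set.add u) := by
  induction cs generalizing u with
  | nil => rfl
  | cons c cs ih =>
    simp only [List.foldl_cons, List.filter_cons]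
    by_cases ha : PySem.Chars.isalpha c = true
    · by_cases hc : c ∈ u
      · have hco : PySem.Set.contains (u : PySem.Set Char) c = true := by
          simp [PySem.Set.contains, hc]
        have hadd : PySem.Set.add (u : PySem.Set Char) c = u := by
          simp [PySem.Set.add, PySem.Set.contains, hc]
        rw [if_neg (fun h => h.1 hco), if_pos ha, List.foldl_cons, hadd, ih u]
      · have hco : ¬ PySem.Set.contains (u : PySem.Set Char) c = true := by
          simp [PySem.Set.contains, hc]
        have hadd : PySem.Set.add (u : PySem.Set Char) c = u ++ [c] := by
          simp [PySem.Set.add, PySem.Set.contains, hc]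
        rw [if_pos ⟨hco, ha⟩, if_pos ha, hadd, List.foldl_cons, hadd, ih (u ++ [c])]
    · rw [if_neg (by simp [ha]), if_neg ha, ih u]

lemma pvDedupA_spec (cs : List Char) :
    pvDedupA cs = (PySem.List.dedup (cs.filter PySem.Chars.isalpha),
                   PySem.List.dedup (cs.filter PySem.Chars.isalpha)) := by
  have h : (PySem.Set.empty : PySem.Set Char) = ([] : List Char) := rfl
  rw [PySem.List.dedup_eq_ofList, PySem.Set.ofList_eq_foldl]
  unfold pvDedupA
  rw [h]
  exact pvDedupA_foldl cs []

-- Phase 2 of A: the break-loop padding appends the first needed unused alphabet letters.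
lemma pvPadA_spec (al : List Char) : ∀ (u : List Char) (len : Int), al.Nodup →
    pvPadA al u u len
      = u ++ (al.filter (fun c => !(u.contains c))).take (len - (u.length : Int)).toNat := by
  induction al with
  | nil => intro u len _; simp [pvPadA]
  | cons c al ih =>
    intro u len hnd
    rw [pvPadA]
    by_cases hlen : len ≤ (u.length : Int)
    · have h0 : (len - (u.length : Int)).toNat = 0 := by omega
      simp [hlen, h0]
    · by_cases hc : c ∈ u
      · have hfil : List.filter (fun d => !(u.contains d)) (c :: al)
             = List.filter (fun d => !(u.contains d)) al := by
          simp [hc]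
        rw [if_neg hlen, if_neg (by simp [PySem.Set.contains, hc]),
            ih u len (List.Nodup.of_cons hnd), hfil]
      · have hadd : PySem.Set.add (u : PySem.Set Char) c = u ++ [c] := by
          simp [PySem.Set.add, PySem.Set.contains, hc]
        rw [if_neg hlen, if_pos (by simp [PySem.Set.contains, hc]), hadd,
            ih (u ++ [c]) len (List.Nodup.of_cons hnd)]
        have hfc : List.filter (fun d => !((u ++ [c]).contains d)) al
            = List.filter (fun d => !(u.contains d)) al := by
          apply List.filter_congr
          intro d hd
          have hdc : d ≠ c := fun h => (List.nodup_cons.mp hnd).1 (h ▸ hd)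
          simp [hdc]
        have harith : (len - ((u ++ [c]).length : Int)).toNat + 1
            = (len - (u.length : Int)).toNat := by
          simp only [List.length_append, List.length_cons, List.length_nil]
          omega
        rw [hfc]
        rw [List.filter_cons_of_pos (by simp [hc])]
        rw [← harith, List.take_succ_cons]
        simp

-- scatter: an index no pair points at keeps its initial value
lemma scatter_skip (ps : List (Int × Char)) (r0 : Int) (init : List Int) (i : Nat)
    (hpos : ∀ q ∈ ps, 0 ≤ q.1) (hni : (i : Int) ∉ ps.map Prod.fst) :
    ((PySem.List.enumerate ps r0).foldl
      (fun key rp => PySem.List.pySetD key rp.2.1 rp.1) init)[i]? = init[i]? := by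
  induction ps generalizing r0 init with
  | nil => rfl
  | cons p ps ih =>
    rw [PySem.List.enumerate_cons, List.foldl_cons]
    rw [ih (r0 + 1) _ (fun q hq => hpos q (List.mem_cons_of_mem _ hq))
        (fun h => hni (List.mem_cons_of_mem _ h))]
    rw [PySem.List.pySetD_of_nonneg _ _ (hpos p (List.mem_cons_self ..))]
    apply List.getElem?_set_ne
    have h1 : p.1 ≠ (i : Int) := by
      intro h; exact hni (by simp [← h])
    have h2 : 0 ≤ p.1 := hpos p (List.mem_cons_self ..)
    omega

-- scatter: the index pointed at by the pair after l₁ receives r0 + l₁.length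
lemma scatter_hit (l₁ l₂ : List (Int × Char)) (i : Nat) (c : Char) :
    ∀ (r0 : Int) (init : List Int),
    (∀ q ∈ l₁ ++ ((i : Int), c) :: l₂, 0 ≤ q.1) →
    ((l₁ ++ ((i : Int), c) :: l₂).map Prod.fst).Nodup →
    i < init.length →
    ((PySem.List.enumerate (l₁ ++ ((i : Int), c) :: l₂) r0).foldl
      (fun key rp => PySem.List.pySetD key rp.2.1 rp.1) init)[i]?
    = some (r0 + (l₁.length : Int)) := by
  induction l₁ with
  | nil =>
    intro r0 init hpos hnd hi
    rw [List.nil_append, PySem.List.enumerate_cons, List.foldl_cons]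
    have hni : (i : Int) ∉ l₂.map Prod.fst := by
      rw [List.nil_append, List.map_cons, List.nodup_cons] at hnd
      exact hnd.1
    rw [scatter_skip l₂ (r0 + 1) _ i (fun q hq => hpos q (by simp [hq])) hni]
    rw [PySem.List.pySetD_of_nonneg _ _ (by simp : (0:Int) ≤ ((i : Int), c).1)]
    simp [hi]
  | cons p l₁ ih =>
    intro r0 init hpos hnd hi
    rw [List.cons_append, PySem.List.enumerate_cons, List.foldl_cons]
    rw [ih (r0 + 1) _ (fun q hq => hpos q (List.mem_cons_of_mem _ hq))
        (by rw [List.cons_append, List.map_cons, List.nodup_cons] at hnd; exact hnd.2)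
        (by rw [PySem.List.length_pySetD]; exact hi)]
    congr 1
    simp only [List.length_cons]
    push_cast
    ring

-- in a strictly snd-increasing list, the number of smaller snds is the position
lemma countP_lt_append (l₁ l₂ : List (Int × Char)) (x : Int × Char)
    (h : List.Pairwise (fun a b => a.2 < b.2) (l₁ ++ x :: l₂)) :
    (l₁ ++ x :: l₂).countP (fun e => decide (e.2 < x.2)) = l₁.length := by
  induction l₁ with
  | nil =>
    simp only [List.nil_append, List.countP_cons, List.length_nil]
    have hhead := (List.pairwise_cons.mp h).1
    have h2 : l₂.countP (fun e => decide (e.2 < x.2)) = 0 := by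
      rw [List.countP_eq_zero]
      intro e he
      simp only [decide_eq_true_eq, not_lt]
      exact le_of_lt (hhead e he)
    simp [h2]
  | cons a l₁ ih =>
    rw [List.cons_append] at h ⊢
    have hhead := (List.pairwise_cons.mp h).1
    have htail := (List.pairwise_cons.mp h).2
    have ha : a.2 < x.2 := hhead x (by simp)
    simp [ih htail, ha]

-- the core: A's sort/enumerate/scatter equals B's count-smaller ranks padded with zeros
lemma core_key (v : List Char) (n : Nat) (hnd : v.Nodup) (hvn : v.length ≤ n) :
    (PySem.List.enumerate
        (PySem.List.sorted (PySem.List.enumerate v 0) (fun x => x.2) false) 1).foldl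
      (fun key rp => PySem.List.pySetD key rp.2.1 rp.1) (List.replicate n (0 : Int))
    = v.map (fun c => 1 + (((v.filter (fun d => decide (d < c))).length : Int)))
      ++ List.replicate (n - v.length) 0 := by
  set S := PySem.List.sorted (PySem.List.enumerate v 0) (fun x => x.2) false with hS
  have hperm : S.Perm (PySem.List.enumerate v 0) := PySem.List.sorted_perm _ _ _
  have hsndperm : (S.map (fun x => x.2)).Perm v := by
    have := hperm.map (fun x : Int × Char => x.2)
    rwa [PySem.List.map_snd_enumerate] at this
  have hlt : S.Pairwise (fun a b => a.2 < b.2) := by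
    have h1 := PySem.List.sorted_pairwise (PySem.List.enumerate v 0) (fun x : Int × Char => x.2)
    have h3 : List.Pairwise (· ≠ ·) (S.map (fun x => x.2)) := hsndperm.nodup_iff.mpr hnd
    have h2 : S.Pairwise (fun a b => a.2 ≠ b.2) := List.pairwise_map.mp h3
    exact (h1.and h2).imp (fun hab => lt_of_le_of_ne hab.1 hab.2)
  have hfstperm : (S.map Prod.fst).Perm (PySem.List.pyRange 0 (0 + (v.length : Int))) := by
    have := hperm.map Prod.fst
    rwa [PySem.List.map_fst_enumerate] at this
  have hfst_nodup : (S.map Prod.fst).Nodup := by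
    refine ((hperm.map Prod.fst).nodup_iff).mpr ?_
    have hp := PySem.List.pairwise_lt_enumerate v 0
    exact List.pairwise_map.mpr (hp.imp fun hab => ne_of_lt hab)
  have hposS : ∀ q ∈ S, 0 ≤ q.1 := by
    intro q hq
    have hq' : q ∈ PySem.List.enumerate v 0 := hperm.subset hq
    rw [PySem.List.mem_enumerate_iff] at hq'
    obtain ⟨k, hk, rfl⟩ := hq'
    simp
  have hmemfst : ∀ i : Nat, ((i : Int) ∈ S.map Prod.fst ↔ i < v.length) := by
    intro i
    rw [hfstperm.mem_iff, PySem.List.mem_pyRange_one]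
    omega
  apply List.ext_getElem?
  intro i
  by_cases hiv : i < v.length
  · have hmemS : ((i : Int), v[i]) ∈ S := by
      rw [hS, PySem.List.mem_sorted, PySem.List.mem_enumerate_iff]
      exact ⟨i, hiv, by simp⟩
    obtain ⟨l₁, l₂, hSdec⟩ := List.append_of_mem hmemS
    rw [List.getElem?_append_left (by simpa using hiv), List.getElem?_map]
    rw [hSdec]
    rw [scatter_hit l₁ l₂ i (v[i]) 1 _ (hSdec ▸ hposS) (hSdec ▸ hfst_nodup)
        (by simpa using lt_of_lt_of_le hiv hvn)]

    have hcount : (v.filter (fun d => decide (d < v[i]))).length = l₁.length := by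
      rw [← List.countP_eq_length_filter]
      have hc1 := (hsndperm.countP_eq (fun d => decide (d < v[i]))).symm
      rw [hc1, List.countP_map]
      have hc2 := countP_lt_append l₁ l₂ ((i : Int), v[i]) (hSdec ▸ hlt)
      rw [hSdec]
      simpa [Function.comp] using hc2
    rw [List.getElem?_eq_getElem hiv]
    simp [hcount]
  · rw [scatter_skip S 1 _ i hposS (by rw [hmemfst]; omega)]
    rw [List.getElem?_append_right (by simpa using not_lt.mp hiv)]
    simp only [List.getElem?_replicate, List.length_map]
    by_cases hin : i < n
    · rw [if_pos hin, if_pos (by omega)]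
    · rw [if_neg hin, if_neg (by omega)]

theorem word_to_key_py_spec : Claim_equal_word_to_key_py := by
  intro word length hdom hpre
  unfold Pre_word_to_key_py at hpre
  unfold Spec_word_to_key_py word_to_key_py word_to_key_py_alt
  rw [pvDedupA_spec]
  simp only []
  rw [pvPadA_spec pvAlpha _ length (by decide)]
  set u := PySem.List.dedup (((PySem.Str.upper word).toList).filter PySem.Chars.isalpha) with hu
  by_cases hpos : 0 ≤ length
  · -- length ≥ 0
    rw [PySem.List.slice_to _ hpos, PySem.List.pyRepeat_singleton]
    set v := (u ++ (pvAlpha.filter (fun c => !(u.contains c))).take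
        (length - (u.length : Int)).toNat).take length.toNat with hv
    have hndv : v.Nodup := by
      apply List.Nodup.sublist (List.take_sublist _ _)
      rw [List.nodup_append]
      refine ⟨PySem.List.nodup_dedup _, ?_, ?_⟩
      · exact List.Nodup.sublist (List.take_sublist _ _) ((by decide : pvAlpha.Nodup).filter _)
      · intro a ha b hb hab
        have hpred := List.of_mem_filter (List.take_subset _ _ hb)
        rw [hab] at ha
        simp at hpred
        exact hpred ha
    have hvn : v.length ≤ length.toNat := List.length_take_le _ _
    rw [core_key v length.toNat hndv hvn]
    congr 1
    congr 1
    rw [List.length_map]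
    omega
  · -- length < 0 : Pre_ gives few enough distinct letters; everything is empty
    have hneg : length < 0 := by omega
    have hple : (u.length : Int) ≤ -length := by
      rcases hpre with h | h
      · omega
      · exact h
    have hpad0 : (length - (u.length : Int)).toNat = 0 := by omega
    rw [hpad0, List.take_zero, List.append_nil]
    obtain ⟨k, hk, hk0, huk⟩ : ∃ k : Nat, length = -(k : Int) ∧ 0 < k ∧ u.length ≤ k :=
      ⟨(-length).toNat, by omega, by omega, by omega⟩
    rw [hk, PySem.List.slice_to_neg_natCast u k hk0]
    have h0 : u.length - k = 0 := by omega
    rw [h0, List.take_zero]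
    have hT : ((-(k : Int)).toNat) = 0 := by omega
    rw [PySem.List.enumerate_nil]
    rw [show PySem.List.sorted ([] : List (Int × Char)) (fun x => x.2) false = [] from by
      simp [PySem.List.sorted_eq_nil_iff]]
    rw [PySem.List.enumerate_nil, List.foldl_nil, PySem.List.pyRepeat_singleton, hT]
    simp
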